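-- pv_equiv track=rewrite | github.com/rw901014/git_minning | commit_file_analysis.py | commit_file_analysis
-- ===== SOURCE A (Python) =====
-- def commit_file_analysis(dictionary):
--     test_commit=0
--     fun_commit=0
--     for k,v in dictionary.items():
--         if v.find("test")>=0:
--             test_commit=test_commit+1
--         else:
--             pass
--     for k,v in dictionary.items():
--         if v.find("test")<0:
--             fun_commit=fun_commit+1
--         else:
--             pass
--     return test_commit, fun_commit
-- ===== SOURCE B (Python) =====
-- def commit_file_analysis(dictionary):
--     n = len(dictionary)
--     test_commit = sum(v.find("test") >= 0 for v in dictionary.values())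
--     return test_commit, n - test_commit
-- ===== Notes on version B (the rewrite author's own statement) =====
-- stated objective: simpler
-- what changed: Replaces A's two complementary classifying loops with a single counting pass (sum of booleans) and derives the complementary count as len(dictionary) minus the count.
import Mathlib
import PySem

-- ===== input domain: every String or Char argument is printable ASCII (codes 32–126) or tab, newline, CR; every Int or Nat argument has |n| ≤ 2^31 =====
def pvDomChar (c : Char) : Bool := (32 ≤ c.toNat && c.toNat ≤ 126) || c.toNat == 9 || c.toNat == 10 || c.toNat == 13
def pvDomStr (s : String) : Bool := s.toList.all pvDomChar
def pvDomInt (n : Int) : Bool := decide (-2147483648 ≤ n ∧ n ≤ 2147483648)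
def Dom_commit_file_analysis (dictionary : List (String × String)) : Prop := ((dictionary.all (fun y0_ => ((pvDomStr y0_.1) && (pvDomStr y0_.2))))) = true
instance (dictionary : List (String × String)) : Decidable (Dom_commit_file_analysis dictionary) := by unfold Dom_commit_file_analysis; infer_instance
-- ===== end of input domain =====

-- ===== PORT A =====
-- Port of A: two foldl passes over the items; the first counts values with find("test")>=0,
-- the second counts values with find("test")<0.
def commit_file_analysis (dictionary : List (String × String)) : Int × Int :=
  let test_commit : Int :=
    dictionary.foldl (fun acc kv => if PySem.Str.find kv.2 "test" ≥ 0 then acc + 1 else acc) 0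
  let fun_commit : Int :=
    dictionary.foldl (fun acc kv => if PySem.Str.find kv.2 "test" < 0 then acc + 1 else acc) 0
  (test_commit, fun_commit)

-- ===== PORT B =====
-- Port of B: one counting pass (sum of booleans over the values, ported as countP);
-- the complement is n minus that count.
def commit_file_analysis_alt (dictionary : List (String × String)) : Int × Int :=
  let n : Int := dictionary.length
  let test_commit : Int :=
    ((dictionary.map Prod.snd).countP (fun v => decide (PySem.Str.find v "test" ≥ 0)) : Nat)
  (test_commit, n - test_commit)

-- ===== PRECONDITION & SPEC =====
def Spec_commit_file_analysis (dictionary : List (String × String)) (out : Int × Int) : Prop := out = commit_file_analysis_alt dictionary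
instance (dictionary : List (String × String)) (out : Int × Int) : Decidable (Spec_commit_file_analysis dictionary out) := by unfold Spec_commit_file_analysis; infer_instance

-- ===== CLAIM (what is proved, stated in full; the proofs are below) =====
def Claim_equal_commit_file_analysis : Prop := ∀ (dictionary : List (String × String)), Dom_commit_file_analysis dictionary → Spec_commit_file_analysis dictionary (commit_file_analysis dictionary)

-- ===== LEMMAS AND PROOFS =====

-- ===== VERDICT (by name: the statement is the Claim_ definition above) =====
theorem pv_fold_ge_eq_countP (l : List (String × String)) (a : Int) :
    l.foldl (fun acc kv => if PySem.Str.find kv.2 "test" ≥ 0 then acc + 1 else acc) a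
      = a + ((l.map Prod.snd).countP (fun v => decide (PySem.Str.find v "test" ≥ 0)) : Nat) := by
  induction l generalizing a with
  | nil => simp
  | cons h t ih =>
    simp only [List.foldl_cons, List.map_cons, List.countP_cons]
    rw [ih]
    split_ifs <;> simp only [decide_eq_true_eq] at * <;> push_cast <;> omega

theorem pv_fold_lt_eq (l : List (String × String)) (a : Int) :
    l.foldl (fun acc kv => if PySem.Str.find kv.2 "test" < 0 then acc + 1 else acc) a
      = a + (l.length : Int)
        - ((l.map Prod.snd).countP (fun v => decide (PySem.Str.find v "test" ≥ 0)) : Nat) := by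
  induction l generalizing a with
  | nil => simp
  | cons h t ih =>
    simp only [List.foldl_cons, List.map_cons, List.countP_cons, List.length_cons]
    rw [ih]
    split_ifs <;> simp only [decide_eq_true_eq] at * <;> push_cast <;> omega

-- ===== VERDICT (by name: the statement is the Claim_ definition above) =====
theorem commit_file_analysis_spec : Claim_equal_commit_file_analysis := by
  intro dictionary _
  unfold Spec_commit_file_analysis commit_file_analysis commit_file_analysis_alt
  refine Prod.ext ?_ ?_
  · exact (pv_fold_ge_eq_countP dictionary 0).trans (by ring)
  · exact (pv_fold_lt_eq dictionary 0).trans (by ring)
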